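-- pv_equiv track=rewrite | github.com/parkpow/deep-license-plate-recognition | stream/ipro-adam-app/python/pymain.py | get_stream_log_level_context
-- ===== SOURCE A (Python) =====
-- enum_values = ["10", "20", "30", "40", "50"]
--
-- def get_stream_log_level_context(stream_log_level: int) -> list:
--     """
--     Generate selected attribute for stream log level options.
--     """
--     selected = 'selected="selected"'
--     unselected = ""
--
--     context = []
--
--     for i, _value in enumerate(enum_values):
--         if stream_log_level == i:
--             context.append(selected)
--         else:
--             context.append(unselected)
--
--     return context
-- ===== SOURCE B (Python) =====
-- enum_values = ["10", "20", "30", "40", "50"]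
--
-- def get_stream_log_level_context(stream_log_level: int) -> list:
--     n = len(enum_values)
--     if 0 <= stream_log_level < n:
--         return ([""] * stream_log_level
--                 + ['selected="selected"']
--                 + [""] * (n - stream_log_level - 1))
--     return [""] * n
-- ===== Notes on version B (the rewrite author's own statement) =====
-- stated objective: simpler
-- what changed: Replaces the enumerate loop that compares every index against the level with a closed-form concatenation of three segments (empty prefix, the selected marker, empty suffix), with no loop or per-element comparison at all.
import Mathlib
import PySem

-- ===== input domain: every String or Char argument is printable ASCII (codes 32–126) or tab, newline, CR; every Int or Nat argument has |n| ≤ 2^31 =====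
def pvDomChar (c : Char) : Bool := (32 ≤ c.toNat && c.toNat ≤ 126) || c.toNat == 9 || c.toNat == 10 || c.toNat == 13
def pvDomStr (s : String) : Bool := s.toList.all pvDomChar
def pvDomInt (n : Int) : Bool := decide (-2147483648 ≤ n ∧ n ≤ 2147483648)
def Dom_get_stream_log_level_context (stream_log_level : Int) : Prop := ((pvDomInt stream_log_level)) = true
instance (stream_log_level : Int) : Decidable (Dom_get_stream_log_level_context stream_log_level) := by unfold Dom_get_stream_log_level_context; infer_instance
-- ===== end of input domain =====

-- B replaces A's compare-every-index loop with a closed-form concatenation of prefix/marker/suffix segments (simpler, no loop).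


-- ===== PORT A =====
-- enum_values from the module
def enum_values : List String := ["10", "20", "30", "40", "50"]

-- for i, _value in enumerate(enum_values): append selected/unselected
def get_stream_log_level_context (stream_log_level : Int) : List String :=
  let selected := "selected=\"selected\""
  let unselected := ""
  (PySem.List.enumerate enum_values).foldl
    (fun context iv =>
      if stream_log_level = (iv.1 : Int) then context ++ [selected]
      else context ++ [unselected])
    []

-- ===== PORT B =====
-- B: closed-form concatenation: empty prefix ++ [marker] ++ empty suffix, or all-empty if out of range
def get_stream_log_level_context_alt (stream_log_level : Int) : List String :=
  let n := enum_values.length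
  if 0 ≤ stream_log_level ∧ stream_log_level < (n : Int) then
    List.replicate stream_log_level.toNat ""
      ++ ["selected=\"selected\""]
      ++ List.replicate (n - stream_log_level.toNat - 1) ""
  else
    List.replicate n ""

-- ===== PRECONDITION & SPEC =====
def Spec_get_stream_log_level_context (stream_log_level : Int) (out : List String) : Prop := out = get_stream_log_level_context_alt stream_log_level
instance (stream_log_level : Int) (out : List String) : Decidable (Spec_get_stream_log_level_context stream_log_level out) := by unfold Spec_get_stream_log_level_context; infer_instance

-- ===== CLAIM (what is proved, stated in full; the proofs are below) =====
def Claim_equal_get_stream_log_level_context : Prop := ∀ (stream_log_level : Int), Dom_get_stream_log_level_context stream_log_level → Spec_get_stream_log_level_context stream_log_level (get_stream_log_level_context stream_log_level)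

-- ===== LEMMAS AND PROOFS =====

-- ===== VERDICT (by name: the statement is the Claim_ definition above) =====
theorem get_stream_log_level_context_spec : Claim_equal_get_stream_log_level_context := by
  intro n _
  unfold Spec_get_stream_log_level_context get_stream_log_level_context
    get_stream_log_level_context_alt enum_values
  simp only [PySem.List.enumerate_cons, PySem.List.enumerate_nil, List.foldl,
    List.length]
  by_cases h0 : n = 0
  · subst h0; decide
  by_cases h1 : n = 1
  · subst h1; decide
  by_cases h2 : n = 2
  · subst h2; decide
  by_cases h3 : n = 3
  · subst h3; decide
  by_cases h4 : n = 4
  · subst h4; decide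
  split_ifs <;> first | rfl | omega
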